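/- GENERATED by mk_final_copies.py from the proof of the farm's unit `codebook_decode_deinterleave_repeat.2b` (farm:codebook_decode_deinterleave_repeat.2b.1: Proof.lean) as the
   re-elaboration sweep compiled it — do not edit. -/
import Asan.CheckWalk
import Vorbis.Spec.ReaderLemmas
import Vorbis.Spec.PacketRest3
import Vorbis.Spec.Units.codebook_decode_deinterleave_repeat_2b
import Vorbis.Spec.Worked.codebook_decode_deinterleave_repeat_2b_Lemmas

open X86 X86.User Asan Vorbis Vorbis.Spec Vorbis.Spec.Deint

set_option maxRecDepth 4000
set_option maxHeartbeats 4000000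

/-- **Segment .2b of `codebook_decode_deinterleave_repeat`: DECODE_RAW proper, 10DE32H … 10DECFH ∨ 10DC5CH** (C line 1903,
`DECODE_VQ(z, f, c)` after the `prep_huffman` test): from the join `At2b` (the loop invariant inside a round) to the join `At2d`
(r14d = `z`, a DECODE_RAW result) or to the `z < 0` handler `At2c`. Three paths:
  * `fast_huffman[acc & 1023] < 0` (`js` 10DE71H): `z = codebook_decode_scalar_raw(f, c)` (10DCB5H; `BookPre` over the three stack
    stores: `stack_stores`, `book_carry`), `mov r14d, eax`, → `At2d`;
  * the fast path (K5, K3: `codeword_lengths[FH]` is a byte of the lengths block): `f->acc >>= n`, `f->valid_bits −= n` not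
    negative → `At2d` with `z = FH`;
  * … negative → `f->valid_bits = 0` (10DC52H) and into the handler → `At2c`.
Five check sites (load4 `f->acc`, load2 `fast_huffman[k]`, load8 `c->codeword_lengths`, load1 `codeword_lengths[FH]`, load4
`f->valid_bits`). The loads are NAMED before the walk (`A`, `k`, `FH`, `CL`, `VB`, `LEN`); the walk stops at the return of the
load8 check (`ret22`) to turn `FH ≥ 0` into the address of the length byte, then goes on. Every exit ends with
`InRound2.carry_seg2` / `Common.carry_seg2` over `Mem.SameExcept (Seg2Wins …)` chained from the join. -/
theorem Vorbis.Spec.Worked.codebook_decode_deinterleave_repeat_2b_ok : Vorbis.Spec.codebook_decode_deinterleave_repeat_2b.Statement := by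
  intro Lay hLay μ hμ u₀ hcode h_load1 h_load4 h_raw h_load2 h_load8 others frames Blk len ret e u ci pi eff td hat
  -- 10DE32H (`at_10de32`): the entry assertion `At2b`, opened into its leaves
  obtain ⟨hrip, hround⟩ := hat
  have hround' := hround
  obtain ⟨hcom, hloc, hinv, htd⟩ := hround'
  have hcom' := hcom
  obtain ⟨hmid, hpre, hreader, hcb, hapart, hbook, htype2, hc, chSlot, outsSlot, fSlot, cpSlot, ppSlot, lenSlot, htable, hcInt,
    hpInt⟩ := hcom'
  obtain ⟨he, hrsp, hra, h15, h14, h13, h12, hbp, hbx, hsame, hcodeok, habi, hun⟩ := hmid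
  obtain ⟨ciReg, piSlot, effReg, tdSlot⟩ := hloc
  -- the entry state's frame facts, and where `*f`, the struct at `c` … lie (`DeintGeo`)
  v_entry he
  have g : DeintGeo e := DeintGeo.of_pre hpre he_room
  -- the present state `u` under the names the walker reads
  have hdf := habi.1
  have hmx := habi.2
  have hsse := Vorbis.sseOK_of_abiInv habi
  have w_eq : Mem.EqOn Vorbis.L.textLo Vorbis.L.textHi u₀.mem u.mem := hcodeok
  have hraw := h_raw others frames Blk len
  have gf1 := g.f_st
  have gf2 := g.f_lo
  have gf3 := g.f_hi
  simp only [fOf] at gf1 gf2 gf3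
  -- the struct at `c`, as a number
  have gc1 := g.c_st
  have gc2 := g.c_lo
  have gc3 := g.c_hi
  have gc4 := g.c_f
  have hL := hpre.book.reader.env.live
  obtain ⟨B, hB, hBin⟩ := hpre.book.book
  obtain ⟨c, hcn⟩ : ∃ c : Nat, (e.reg .rsi).toNat = c := ⟨_, rfl⟩
  simp only [fOf, cOf, hcn] at gc1 gc2 gc3 gc4
  have hrsi : e.reg .rsi = addr c := eq_addr _ _ hcn
  have c_r12 : u.reg .r12 = addr c := hc.trans hrsi
  clear hc
  have hcb' : CodebookOK Blk u.mem c := by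
    rw [← hcn]
    exact hcb
  have eC8 : addr c + 8 = addr (c + 8) := addr_add_lit c 8
  have hTc8 : (addr (c + 8)).toNat = c + 8 := toNat_addr _ (by omega)
  have hTc : (addr c).toNat = c := toNat_addr _ (by omega)
  -- the loads of the segment, NAMED before the walk: `A` = f->acc, `VB` = f->valid_bits, `CL` = c->codeword_lengths,
  -- `k` = acc & 1023, `FH` = the 16-bit entry c->fast_huffman[k]
  obtain ⟨A, hA⟩ : ∃ A : Nat, u.mem.readLE (e.reg .rdi + 1764) 4 = A := ⟨_, rfl⟩
  obtain ⟨VB, hVB⟩ : ∃ VB : Nat, u.mem.readLE (e.reg .rdi + 1768) 4 = VB := ⟨_, rfl⟩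
  have L8 : u.mem.readLE (addr (c + 8)) 8 = Codebook.codeword_lengths u.mem c := by
    simp only [vfield, vacc, voff]
  have eK := Vorbis.Spec.vorbis_decode_packet_rest.fast_huffman_addr c A
  have hk1024 : A % 1024 < 1024 := Nat.mod_lt _ (by decide)
  generalize hk : A % 1024 = k at *
  have hTk : (addr (c + 48 + 2 * k)).toNat = c + 48 + 2 * k := toNat_addr _ (by omega)
  obtain ⟨FH, hFH⟩ : ∃ FH : Nat, u.mem.readLE (addr (c + 48 + 2 * k)) 2 = FH := ⟨_, rfl⟩
  have hFHlt : FH < 65536 := by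
    rw [← hFH]
    exact Mem.readLE_lt' u.mem _ 2
  have hfh : Codebook.fast_huffman u.mem c k = sint16 FH := by
    simp only [vacc, voff]
    unfold Mem.i16 Mem.u16
    rw [hFH]
  generalize hCL : Codebook.codeword_lengths u.mem c = CL at *
  -- the first walk: 10DE32H … the call 10DCB5H (`js` taken) / the return `ret22` = 10DE81H of the load8 check (`js` not taken)
  u_walk hcode [hμ.vendor, eC8, eK] until [Vorbis.L.codebook_decode_deinterleave_repeat.at_10decf,
    Vorbis.L.codebook_decode_deinterleave_repeat.at_10dc5c, Vorbis.L.codebook_decode_deinterleave_repeat.ret22]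
    span [Vorbis.L.textLo, Vorbis.L.textHi] side (v_side)
  case check_10de3e =>
    -- 10DE3EH: load4 `f->acc`
    have hun1 : ShadowUntouched u.mem s_10de3e.mem := by v_untouched
    have hun2 : ShadowUntouched e.mem s_10de3e.mem := hun.trans hun1
    refine hpre.book.reader.env.obj.accSmall hpre.args hun2 _ 4 (by decide) (by u_omega) ?_
    simp only [Vorbis.Off.sizeof.stb_vorbis]
    u_omega
  case check_10de60 =>
    -- 10DE60H: load2 `c->fast_huffman[acc & 1023]`, inside the struct at `c`
    have hun1 : ShadowUntouched u.mem s_10de60.mem := by v_untouched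
    have hun2 : ShadowUntouched e.mem s_10de60.mem := hun.trans hun1
    rw [hcn] at hBin
    have hs : Site (Live (stackObjs frames ++ others)) (c + 48 + 2 * k) 2 :=
      Codebook.site_field hL hB hBin (48 + 2 * k) 2 (by simp only [voff]; omega) (by omega) (by omega)
    exact check_site hpre.args hun2 hs hTk
  case call_inv =>
    v_inv
  case pre_10dcb5 =>
    -- 10DCB5H: `codebook_decode_scalar_raw(f, c)`: `BookPre` over the stack stores since the join
    show BookPre others frames Blk len s_10dcb5
    have hun1 : ShadowUntouched u.mem s_10dcb5.mem := by v_untouched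
    have hun2 : ShadowUntouched e.mem s_10dcb5.mem := hun.trans hun1
    have hsh : ShadowPre others frames s_10dcb5 :=
      hpre.book.reader.shadow.callee hun2 (by u_omega) (by u_omega) (by u_omega)
    obtain ⟨hs, hrd, _⟩ := Vorbis.Spec.codebook_decode_deinterleave_repeat_2b.stack_stores hcom g _ _ _ w_mem
    obtain ⟨hcb1, hap1, _⟩ := Vorbis.Spec.codebook_decode_deinterleave_repeat_2b.book_carry hcom g hs
    refine ⟨hpre.book.reader.again hsh w_rdi hrd.bits, hpre.book.ok, ?_, ?_, ?_⟩
    · rw [w_rsi, hTc, ← hcn]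
      exact hpre.book.book
    · rw [w_rsi, hTc, ← hcn]
      exact hcb1
    · rw [w_rdi, w_rsi, hTc, ← hcn]
      exact hap1
  case check_10de7c =>
    -- 10DE7CH: load8 `c->codeword_lengths`
    have hun1 : ShadowUntouched u.mem s_10de7c.mem := by v_untouched
    have hun2 : ShadowUntouched e.mem s_10de7c.mem := hun.trans hun1
    rw [hcn] at hBin
    have hs : Site (Live (stackObjs frames ++ others)) (c + 8) 8 :=
      Codebook.site_field hL hB hBin 8 8 (by simp only [voff]; omega) (by omega) rfl
    exact check_site hpre.args hun2 hs hTc8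
  · -- 10DCBAH: codebook_decode_scalar_raw has returned; `mov r14d, eax ; jmp 10decf`
    obtain ⟨hpush, hrd0, hp1⟩ := Vorbis.Spec.codebook_decode_deinterleave_repeat_2b.stack_stores hcom g _ _ _ w_mem_10dcb5
    obtain ⟨_, _, hsf1⟩ := Vorbis.Spec.codebook_decode_deinterleave_repeat_2b.book_carry hcom g hpush
    have hpost : ScalarRawPost Blk len s_10dcb5 s_10dcb5r := w_post
    v_after_call w_rsp_10dcb5 w_mem_10dcb5
    simp only [w_rdi_10dcb5] at w_same
    rw [w_mem_10dcb5] at hpush hp1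
    -- the spill slot of `f`, read through the callee's footprint
    have hs1 : UInt64.ofNat (s_10dcb5r.mem.readLE (e.reg .rsp - 80) 8) = e.reg .rdi := by
      have r := w_same.readLE (e.reg .rsp - 80) 8 (by u_omega) (by
        simp only [List.forall_mem_cons, List.not_mem_nil, false_imp_iff, implies_true, and_true]
        repeat' apply And.intro
        all_goals u_omega)
      rw [r]
      exact hp1
    -- the footprint since the join: the stack stores, then the callee's windows
    have hs : Mem.SameExcept (Seg2Wins (e.reg .rsp).toNat (fOf e)) u.mem s_10dcb5r.mem := by
      refine Vorbis.Spec.Reader.sameExcept_through_callee hpush w_same ?_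
      unfold Seg2Wins
      simp only [fOf, List.forall_mem_cons, List.not_mem_nil, false_imp_iff, implies_true, and_true, X86.User.inSpans_cons,
        X86.User.inSpans_nil, or_false]
      repeat' apply And.intro
      all_goals u_omega
    -- `Bits`, μ: the join's, over the stack stores, then the callee's post
    have hrdp := hpost.reader
    rw [w_rdi_10dcb5] at hrdp
    have hrd : ReaderPost Blk len e.mem s_10dcb5r.mem (fOf e) := hrd0.trans hrdp
    -- the result, over the entry memory
    have hres := hpost.result
    rw [w_rsi_10dcb5, hTc, ← hcn] at hres
    have hres' : DecodeRawResult e.mem (cOf e) (argInt (s_10dcb5r.reg .rax)) :=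
      decodeRaw_at_entry (hbook.trans hsf1) hres
    obtain ⟨z, w_rax⟩ : ∃ z, s_10dcb5r.reg .rax = z := ⟨_, rfl⟩
    rw [w_rax] at hres'
    clear w_same hpush hpost hrdp hres
    u_walk hcode [hμ.vendor] until [Vorbis.L.codebook_decode_deinterleave_repeat.at_10decf]
      span [Vorbis.L.textLo, Vorbis.L.textHi] side (v_side)
    have hab : abiInv s_10dcbd := by
      refine Vorbis.abiInv_of ?_ ?_
      · rw [w_flags]
        exact w_df
      · rw [w_mxcsr]
        exact w_mx
    rw [← w_mem] at hs hrd hs1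
    refine ReachVia.done (Or.inl ⟨w_rip, ?_, ?_⟩)
    · exact InRound2.carry_seg2 hround g hs w_rsp (w_kept .r12 rfl) (w_kept .rbp rfl) (w_kept .r15 rfl) hs1 hrd hab
    · rw [s32_eq_argInt, w_r14, Vorbis.Spec.codebook_decode_deinterleave_repeat_2b.result_sign z]
      exact hres'
  · -- 10DE81H, the fast path: `fast_huffman[k] = FH ≥ 0` (`js` 10DE71H not taken)
    have hH15 : FH < 32768 := by
      rw [Vorbis.Spec.vorbis_decode_packet_rest.sx16_msb FH hFHlt] at hbr_10de71
      have := of_decide_eq_false hbr_10de71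
      omega
    have hs16 : sint16 FH = (FH : Int) := by
      unfold sint16
      rw [if_pos hH15]
    have e64 := Vorbis.Spec.vorbis_decode_packet_rest.sx16_addr FH hH15
    have e32 := Vorbis.Spec.vorbis_decode_packet_rest.sx16_addr32 FH hH15
    have hfh0 : 0 ≤ Codebook.fast_huffman u.mem c k := by
      rw [hfh, hs16]
      omega
    -- K5 + K3: `codeword_lengths[FH]` is a byte of the lengths block
    have hsL : Site (Live (stackObjs frames ++ others)) (CL + FH) 1 := by
      have h0 := hcb'.site_lengths_of_fast hL k hk1024 hfh0 rfl
      rw [hfh, hs16] at h0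
      rw [← hCL]
      exact h0
    have hwL := site_where hpre.args hpre.book.reader.shadow.offText (by omega) hsL
    have eT : L.textHi = 0x119d40 := rfl
    rw [eT] at hwL
    have eL : addr FH + UInt64.ofNat CL = addr (CL + FH) := by
      rw [show UInt64.ofNat CL = addr CL from rfl, addr_add_addr, Nat.add_comm FH CL]
    have hTL : (addr (CL + FH)).toNat = CL + FH := toNat_addr _ (by omega)
    obtain ⟨LEN, hLEN⟩ : ∃ LEN : Nat, u.mem.readLE (addr (CL + FH)) 1 = LEN := ⟨_, rfl⟩
    have hLEN256 : LEN < 256 := by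
      rw [← hLEN]
      exact Mem.readLE_lt' u.mem _ 1
    u_walk hcode [hμ.vendor, eC8, e64, eL] until [Vorbis.L.codebook_decode_deinterleave_repeat.at_10decf,
      Vorbis.L.codebook_decode_deinterleave_repeat.at_10dc5c] span [Vorbis.L.textLo, Vorbis.L.textHi] side (v_side)
    case check_10de8d =>
      -- 10DE8DH: load1 `c->codeword_lengths[FH]`: `0 ≤ FH < N(c)` (K5), inside the lengths block (K3)
      have hun1 : ShadowUntouched u.mem s_10de8d.mem := by v_untouched
      have hun2 : ShadowUntouched e.mem s_10de8d.mem := hun.trans hun1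
      exact check_site hpre.args hun2 hsL hTL
    case check_10deb0 =>
      -- 10DEB0H: load4 `f->valid_bits`
      have hun1 : ShadowUntouched u.mem s_10deb0.mem := by v_untouched
      have hun2 : ShadowUntouched e.mem s_10deb0.mem := hun.trans hun1
      refine hpre.book.reader.env.obj.accSmall hpre.args hun2 _ 4 (by decide) (by u_omega) ?_
      simp only [Vorbis.Off.sizeof.stb_vorbis]
      u_omega
    · -- 10DC5CH: `valid_bits − n` went negative: `f->valid_bits = 0`, into the `z < 0` handler (`At2c`)
      obtain ⟨hs, hrd, hfs⟩ := Vorbis.Spec.codebook_decode_deinterleave_repeat_2b.fast_stores hcom g _ _ _ _ _ 0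
        ⟨0#32, rfl, by decide⟩ _ w_mem
      have hab : abiInv s_10dc52 := by
        refine Vorbis.abiInv_of ?_ ?_
        · rw [w_flags]
          simp only [X86.User.df_setStatus]
          exact w_df_10deb0
        · rw [w_mxcsr]
          exact hmx
      exact ReachVia.done (Or.inr ⟨w_rip, Common.carry_seg2 hcom g hs w_rsp ((w_kept .r12 rfl).trans hcom.c) hfs hrd hab⟩)
    · -- 10DECFH: the bits are consumed, r14d = `FH` (`At2d`)
      have hV1 := hreader.bits.V1
      have hmI := Vorbis.Spec.codebook_decode_deinterleave_repeat_2b.vb_toInt u.mem (fOf e) VB (by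
        rw [addr_toNat]
        exact hVB)
      have hx := Vorbis.Spec.codebook_decode_deinterleave_repeat_2b.vb_sub_V1 (BitVec.ofNat 32 VB) (BitVec.ofNat 8 LEN)
        (by rw [hmI]; exact hV1) hbr_10dec9
      obtain ⟨hs, hrd, hfs⟩ := Vorbis.Spec.codebook_decode_deinterleave_repeat_2b.fast_stores hcom g _ _ _ _ _ _
        ⟨_, rfl, hx⟩ _ w_mem
      have hab : abiInv s_10dec9 := by
        refine Vorbis.abiInv_of ?_ ?_
        · rw [w_flags]
          simp only [X86.User.df_setStatus]
          exact w_df_10deb0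
        · rw [w_mxcsr]
          exact hmx
      refine ReachVia.done (Or.inl ⟨w_rip, ?_, ?_⟩)
      · exact InRound2.carry_seg2 hround g hs w_rsp (w_kept .r12 rfl) (w_kept .rbp rfl) (w_kept .r15 rfl) hfs hrd hab
      · -- `z = fast_huffman[k]`, a DECODE_RAW result (K5), read in the entry memory
        have hz : argInt (s_10dec9.reg .r14) = (FH : Int) := by
          rw [w_r14, e32]
          unfold argInt sint32
          rw [toNat_addr _ (by omega)]
          have e1 : FH % 2 ^ 32 = FH := Nat.mod_eq_of_lt (by omega)
          rw [e1, if_pos (by omega)]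
        rw [s32_eq_argInt, hz]
        have hr := hcb'.decodeRaw_fast k hk1024
        rw [hfh, hs16, ← hcn] at hr
        exact decodeRaw_at_entry hbook hr
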